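-- pv_equiv track=rewrite | github.com/ViperJuice/Code-Index-MCP | tests/test_agent_context_retrieval.py | _find_java_boundaries
-- ===== SOURCE A (Python) =====
-- from typing import List, Dict, Any, Tuple, Optional
--
-- def _find_java_boundaries(lines: List[str], target_line: int,
--                          symbol_type: str) -> Tuple[int, int]:
--     """Find Java symbol boundaries."""
--     start = target_line
--     end = target_line
--
--     # Include annotations
--     while start > 0 and lines[start - 1].strip().startswith('@'):
--         start -= 1
--
--     # Find method/class end by brace counting
--     if symbol_type in ["method", "class"]:
--         brace_count = 0
--         for i in range(target_line, len(lines)):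
--             line = lines[i]
--             brace_count += line.count('{') - line.count('}')
--             if brace_count > 0:
--                 for j in range(i + 1, len(lines)):
--                     line = lines[j]
--                     brace_count += line.count('{') - line.count('}')
--                     if brace_count == 0:
--                         end = j
--                         break
--                 break
--
--     return start, end
-- ===== SOURCE B (Python) =====
-- def _find_java_boundaries(lines, target_line, symbol_type):
--     """Find Java symbol boundaries (prefix-sum reformulation)."""
--     start = target_line
--     while start > 0 and lines[start - 1].strip().startswith('@'):
--         start -= 1
--
--     end = target_line
--     if symbol_type in ("method", "class"):
--         # prefix sums of brace deltas from target_line onwards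
--         sums = []
--         total = 0
--         for k in range(target_line, len(lines)):
--             total += lines[k].count('{') - lines[k].count('}')
--             sums.append(total)
--         opened = next((p for p, v in enumerate(sums) if v > 0), None)
--         if opened is not None:
--             end = next((target_line + p for p in range(opened + 1, len(sums))
--                         if sums[p] == 0), target_line)
--     return start, end
-- ===== Notes on version B (the rewrite author's own statement) =====
-- stated objective: alternative
-- what changed: Replaces A's nested break-on-condition loops (outer scan for the first positive brace count, inner scan for its return to zero) by materialising the prefix sums of per-line brace deltas once and doing two positional searches over that list.
import Mathlib
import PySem

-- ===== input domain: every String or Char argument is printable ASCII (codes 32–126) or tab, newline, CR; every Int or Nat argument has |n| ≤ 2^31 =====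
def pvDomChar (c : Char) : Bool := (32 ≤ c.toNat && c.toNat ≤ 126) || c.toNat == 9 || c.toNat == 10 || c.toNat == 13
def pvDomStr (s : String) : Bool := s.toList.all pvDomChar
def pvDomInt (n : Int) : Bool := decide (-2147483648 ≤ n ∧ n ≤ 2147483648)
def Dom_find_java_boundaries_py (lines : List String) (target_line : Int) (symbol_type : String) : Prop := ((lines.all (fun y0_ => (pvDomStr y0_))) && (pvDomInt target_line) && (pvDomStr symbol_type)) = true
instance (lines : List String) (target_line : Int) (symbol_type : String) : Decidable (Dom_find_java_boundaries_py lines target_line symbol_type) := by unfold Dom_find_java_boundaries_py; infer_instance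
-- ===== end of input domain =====

-- B replaces A's nested brace-counting loops by a materialised prefix-sum list with two
-- positional searches (objective: alternative decomposition, same O(n) cost).

-- ===== PORT A =====
-- per-line brace delta: line.count('{') - line.count('}')  (both Pythons compute this expression)
def pvDelta (line : String) : Int :=
  (PySem.Str.count line "{" : Int) - (PySem.Str.count line "}" : Int)

-- the annotation-backtracking while-loop (identical code in A and in B)
def pvAnnoStart (lines : List String) (start : Int) : Int :=
  if h : 0 < start ∧ PySem.Str.startswith (PySem.Str.strip (PySem.List.pyGetD lines (start - 1) "")) "@" = true
  then pvAnnoStart lines (start - 1)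
  else start
termination_by start.toNat
decreasing_by omega

-- A's inner loop: for j in range(i+1, len): … if brace_count == 0: end = j; break
def pvAInner (lines : List String) (js : List Int) (bc : Int) (tl : Int) : Int :=
  match js with
  | [] => tl
  | j :: rest =>
    let bc' := bc + pvDelta (PySem.List.pyGetD lines j "")
    if bc' = 0 then j else pvAInner lines rest bc' tl

-- A's outer loop: for i in range(target_line, len): … if brace_count > 0: <inner>; break
def pvAOuter (lines : List String) (is' : List Int) (bc : Int) (tl : Int) : Int :=
  match is' with
  | [] => tl
  | i :: rest =>
    let bc' := bc + pvDelta (PySem.List.pyGetD lines i "")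
    if bc' > 0 then pvAInner lines rest bc' tl else pvAOuter lines rest bc' tl

def find_java_boundaries_py (lines : List String) (target_line : Int) (symbol_type : String) : Int × Int :=
  let start := pvAnnoStart lines target_line
  let e :=
    if symbol_type = "method" ∨ symbol_type = "class" then
      pvAOuter lines (PySem.List.pyRange target_line (lines.length : Int) 1) 0 target_line
    else target_line
  (start, e)

-- ===== PORT B =====
-- B's prefix-sum loop: total += delta; sums.append(total)
def pvSums (lines : List String) (ks : List Int) (total : Int) : List Int :=
  match ks with
  | [] => []
  | k :: rest =>
    let t := total + pvDelta (PySem.List.pyGetD lines k "")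
    t :: pvSums lines rest t

def find_java_boundaries_py_alt (lines : List String) (target_line : Int) (symbol_type : String) : Int × Int :=
  let start := pvAnnoStart lines target_line
  let e :=
    if symbol_type = "method" ∨ symbol_type = "class" then
      let sums := pvSums lines (PySem.List.pyRange target_line (lines.length : Int) 1) 0
      -- opened = next((p for p,v in enumerate(sums) if v > 0), None)
      match sums.findIdx? (fun v => decide (0 < v)) with
      | some opened =>
        -- end = next((target_line + p for p in range(opened+1, len(sums)) if sums[p] == 0), target_line)
        match (sums.drop (opened + 1)).findIdx? (fun v => decide (v = 0)) with
        | some d => target_line + ((opened : Int) + 1 + (d : Int))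
        | none => target_line
      | none => target_line
    else target_line
  (start, e)

-- ===== PRECONDITION & SPEC =====
-- Pre_ excludes exactly the inputs where the Python A raises IndexError: target_line
-- beyond len(lines) (annotation loop), and target_line < -len(lines) when the brace
-- loop runs (negative index out of range).
def Pre_find_java_boundaries_py (lines : List String) (target_line : Int) (symbol_type : String) : Prop :=
  target_line ≤ (lines.length : Int) ∧
    ((symbol_type = "method" ∨ symbol_type = "class") → -(lines.length : Int) ≤ target_line)

instance (lines : List String) (target_line : Int) (symbol_type : String) : Decidable (Pre_find_java_boundaries_py lines target_line symbol_type) := by unfold Pre_find_java_boundaries_py; infer_instance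

def pvWitness_find_java_boundaries_py : List String × Int × String := (["void f() {", "  x();", "}"], 0, "method")

def Spec_find_java_boundaries_py (lines : List String) (target_line : Int) (symbol_type : String) (out : Int × Int) : Prop := out = find_java_boundaries_py_alt lines target_line symbol_type
instance (lines : List String) (target_line : Int) (symbol_type : String) (out : Int × Int) : Decidable (Spec_find_java_boundaries_py lines target_line symbol_type out) := by unfold Spec_find_java_boundaries_py; infer_instance

-- ===== CLAIM (what is proved, stated in full; the proofs are below) =====
def Claim_equal_find_java_boundaries_py : Prop := ∀ (lines : List String) (target_line : Int) (symbol_type : String), Dom_find_java_boundaries_py lines target_line symbol_type → Pre_find_java_boundaries_py lines target_line symbol_type → Spec_find_java_boundaries_py lines target_line symbol_type (find_java_boundaries_py lines target_line symbol_type)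

-- ===== LEMMAS AND PROOFS =====

-- A's inner search over a contiguous index range = positional search for 0 in B's prefix sums.
theorem pvInner_eq (lines : List String) (tl : Int) :
    ∀ (n : Nat) (a bc : Int),
      pvAInner lines (PySem.List.pyRange a (a + (n : Int)) 1) bc tl =
        (match (pvSums lines (PySem.List.pyRange a (a + (n : Int)) 1) bc).findIdx? (fun v => decide (v = 0)) with
         | some d => a + (d : Int)
         | none => tl) := by
  intro n
  induction n with
  | zero =>
    intro a bc
    rw [PySem.List.pyRange_one_eq_nil (by omega)]
    simp [pvAInner, pvSums]
  | succ m ih =>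
    intro a bc
    rw [PySem.List.pyRange_one_cons (by omega : a < a + ((m + 1 : Nat) : Int))]
    have hR : PySem.List.pyRange (a + 1) (a + ((m + 1 : Nat) : Int)) 1
        = PySem.List.pyRange (a + 1) ((a + 1) + (m : Int)) 1 := by
      congr 1; push_cast; ring
    rw [hR]
    simp only [pvAInner, pvSums]
    set t := bc + pvDelta (PySem.List.pyGetD lines a "") with ht
    by_cases h0 : t = 0
    · simp [List.findIdx?_cons, h0]
    · simp only [List.findIdx?_cons, h0, decide_false, Bool.false_eq_true, if_false]
      rw [ih (a + 1) t]
      cases hfi : (pvSums lines (PySem.List.pyRange (a + 1) ((a + 1) + (m : Int)) 1) t).findIdx? (fun v => decide (v = 0)) with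
      | none => simp [hfi]
      | some d => simp [hfi]; push_cast; ring

-- A's two nested loops over a contiguous index range = B's two positional searches.
theorem pvOuter_eq (lines : List String) (tl : Int) :
    ∀ (n : Nat) (a bc : Int),
      pvAOuter lines (PySem.List.pyRange a (a + (n : Int)) 1) bc tl =
        (let sums := pvSums lines (PySem.List.pyRange a (a + (n : Int)) 1) bc
         match sums.findIdx? (fun v => decide (0 < v)) with
         | some o =>
           match (sums.drop (o + 1)).findIdx? (fun v => decide (v = 0)) with
           | some d => a + ((o : Int) + 1 + (d : Int))
           | none => tl
         | none => tl) := by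
  intro n
  induction n with
  | zero =>
    intro a bc
    rw [PySem.List.pyRange_one_eq_nil (by omega)]
    simp [pvAOuter, pvSums]
  | succ m ih =>
    intro a bc
    rw [PySem.List.pyRange_one_cons (by omega : a < a + ((m + 1 : Nat) : Int))]
    have hR : PySem.List.pyRange (a + 1) (a + ((m + 1 : Nat) : Int)) 1
        = PySem.List.pyRange (a + 1) ((a + 1) + (m : Int)) 1 := by
      congr 1; push_cast; ring
    rw [hR]
    simp only [pvAOuter, pvSums]
    set t := bc + pvDelta (PySem.List.pyGetD lines a "") with ht
    by_cases hpos : t > 0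
    · rw [if_pos hpos, List.findIdx?_cons]
      rw [if_pos (by simpa using hpos)]
      simp only [List.drop_succ_cons, List.drop_zero]
      rw [pvInner_eq lines tl m (a + 1) t]
      cases hfi : (pvSums lines (PySem.List.pyRange (a + 1) ((a + 1) + (m : Int)) 1) t).findIdx? (fun v => decide (v = 0)) with
      | none => simp [hfi]
      | some d => simp [hfi]; push_cast; ring
    · rw [if_neg hpos, List.findIdx?_cons]
      rw [if_neg (by simpa using hpos)]
      rw [ih (a + 1) t]
      cases hfo : (pvSums lines (PySem.List.pyRange (a + 1) ((a + 1) + (m : Int)) 1) t).findIdx? (fun v => decide (0 < v)) with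
      | none => simp [hfo]
      | some o =>
        simp only [hfo, Option.map_some]
        simp only [List.drop_succ_cons]
        cases hfi : ((pvSums lines (PySem.List.pyRange (a + 1) ((a + 1) + (m : Int)) 1) t).drop (o + 1)).findIdx? (fun v => decide (v = 0)) with
        | none => simp [hfi]
        | some d => simp [hfi]; push_cast; ring

-- ===== VERDICT (by name: the statement is the Claim_ definition above) =====
theorem find_java_boundaries_py_spec : Claim_equal_find_java_boundaries_py := by
  intro lines tl st _hDom hPre
  obtain ⟨hle, -⟩ := hPre
  unfold Spec_find_java_boundaries_py
  unfold find_java_boundaries_py find_java_boundaries_py_alt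
  by_cases hst : st = "method" ∨ st = "class"
  · simp only [hst, if_pos]
    obtain ⟨n, hn⟩ : ∃ n : Nat, (lines.length : Int) = tl + (n : Int) :=
      ⟨((lines.length : Int) - tl).toNat, by omega⟩
    rw [hn, pvOuter_eq lines tl n tl 0]
  · simp only [hst, if_neg, if_false]
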